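-- pv_equiv track=rewrite | github.com/ksayee/programming_assignments | python/CodingExercises/LongestCommonSubsequenceVowels.py | LongestCommonSubsequenceVowels
-- ===== SOURCE A (Python) =====
-- def LongestCommonSubsequenceVowels(str1,str2):
--
--     if len(str1)>=len(str2):
--         big_str=str1
--         big_len=len(str1)+1
--         sml_str=str2
--         sml_len=len(str2)+1
--     else:
--         big_str = str2
--         big_len = len(str2) + 1
--         sml_str = str1
--         sml_len = len(str1) + 1
--
--     lst=[[0 for x in range(0,big_len)] for y in range(0,sml_len)]
--
--     vowels=['a','e','i','o','u']
--     max_sub=0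
--     for i in range(1,sml_len):
--         for j in range(1,big_len):
--             if sml_str[i-1]==big_str[j-1] and sml_str[i-1] in vowels:
--                 lst[i][j]=1+lst[i-1][j-1]
--             else:
--                 lst[i][j]=max(lst[i-1][j],lst[i][j-1])
--             if lst[i][j]>max_sub:
--                 max_sub=lst[i][j]
--
--     i=sml_len-1
--     j=big_len-1
--
--     tmp=[]
--     while i>0 and j>0:
--         if lst[i][j]>0:
--             num=lst[i][j]
--         if num==lst[i][j-1]:
--             j=j-1
--         elif num==lst[i-1][j]:
--             i=i=1
--         else:
--             tmp.insert(0,big_str[j-1])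
--             i=i-1
--             j=j-1
--     return max_sub
-- ===== SOURCE B (Python) =====
-- def LongestCommonSubsequenceVowels(str1, str2):
--     vowels = 'aeiou'
--     xs = [c for c in str1 if c in vowels]
--     ys = [c for c in str2 if c in vowels]
--     prev = [0] * (len(ys) + 1)
--     for x in xs:
--         cur = [0]
--         for j in range(1, len(ys) + 1):
--             cur.append(prev[j - 1] + 1 if x == ys[j - 1] else max(prev[j], cur[-1]))
--         prev = cur
--     return prev[-1]
-- ===== Notes on version B (the rewrite author's own statement) =====
-- stated objective: faster
-- what changed: B filters both strings down to their vowels first and runs a plain rolling-row LCS over the two vowel-only strings (no length-based swap, no full 2D table, no running-max tracking, no backtracking pass), since non-vowel characters can never contribute to the score.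
-- crash fix: On inputs where both strings are nonempty but share no vowel, A raises UnboundLocalError ('num' is never assigned in its backtracking loop because the DP corner is 0); B returns 0, the correct vowel-LCS length, there. — e.g. on LongestCommonSubsequenceVowels("b", "e"): A raises UnboundLocalError, B returns 0
import Mathlib
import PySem

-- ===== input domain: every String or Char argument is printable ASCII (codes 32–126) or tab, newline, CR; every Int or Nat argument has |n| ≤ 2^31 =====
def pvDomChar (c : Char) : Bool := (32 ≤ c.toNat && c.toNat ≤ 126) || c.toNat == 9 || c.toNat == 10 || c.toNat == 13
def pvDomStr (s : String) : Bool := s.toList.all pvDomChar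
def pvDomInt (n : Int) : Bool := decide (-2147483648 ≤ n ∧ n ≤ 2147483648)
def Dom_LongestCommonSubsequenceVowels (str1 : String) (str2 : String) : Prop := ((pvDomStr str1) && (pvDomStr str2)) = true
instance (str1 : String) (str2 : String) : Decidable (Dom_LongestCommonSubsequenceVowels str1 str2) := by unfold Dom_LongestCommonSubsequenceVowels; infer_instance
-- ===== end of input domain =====

-- B replaces A's full-matrix DP over both whole strings by a rolling-row LCS over the vowels-only
-- strings (non-vowels never score); equal return values are proved on Pre_ (where A returns at all).

-- ===== PORT A =====
-- the trailing backtracking while-loop of A: it only builds the discarded list `tmp` (and is where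
-- Python raises UnboundLocalError when `num` is never assigned — ported as `num : Option Int`,
-- stopping at `none`); fuel only makes it total, the loop's result is discarded exactly as in Python
def pvBacktrackA (fuel : Nat) (lst : List (List Int)) (i j : Int) (num : Option Int)
    (bigStr : List Char) (tmp : List Char) : List Char :=
  match fuel with
  | 0 => tmp
  | fuel + 1 =>
    if i > 0 ∧ j > 0 then
      let cur := PySem.List.pyGetD (PySem.List.pyGetD lst i []) j 0
      let num := if cur > 0 then some cur else num
      match num with
      | none => tmp   -- Python raises UnboundLocalError here (outside Pre_)
      | some n =>
        if n = PySem.List.pyGetD (PySem.List.pyGetD lst i []) (j - 1) 0 then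
          pvBacktrackA fuel lst i (j - 1) (some n) bigStr tmp
        else if n = PySem.List.pyGetD (PySem.List.pyGetD lst (i - 1) []) j 0 then
          pvBacktrackA fuel lst 1 j (some n) bigStr tmp   -- Python's `i=i=1` sets i to 1
        else
          pvBacktrackA fuel lst (i - 1) (j - 1) (some n) bigStr
            (PySem.List.pyGetD bigStr (j - 1) ' ' :: tmp)
    else tmp

-- body of A's inner j-loop (state = (lst, max_sub))
def pvInnerA (smlStr bigStr : List Char) (i : Int) (st : List (List Int) × Int) (j : Int) :
    List (List Int) × Int :=
  let lst := st.1
  let maxSub := st.2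
  let si := PySem.List.pyGetD smlStr (i - 1) ' '
  let cell : Int :=
    if si == PySem.List.pyGetD bigStr (j - 1) ' ' &&
        (['a', 'e', 'i', 'o', 'u'] : List Char).contains si then
      1 + PySem.List.pyGetD (PySem.List.pyGetD lst (i - 1) []) (j - 1) 0
    else
      max (PySem.List.pyGetD (PySem.List.pyGetD lst (i - 1) []) j 0)
          (PySem.List.pyGetD (PySem.List.pyGetD lst i []) (j - 1) 0)
  let lst := PySem.List.pySetD lst i (PySem.List.pySetD (PySem.List.pyGetD lst i []) j cell)
  (lst, if cell > maxSub then cell else maxSub)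

-- body of A's outer i-loop
def pvOuterA (smlStr bigStr : List Char) (bigLen : Int) (st : List (List Int) × Int) (i : Int) :
    List (List Int) × Int :=
  (PySem.List.pyRange 1 bigLen 1).foldl (pvInnerA smlStr bigStr i) st

def LongestCommonSubsequenceVowels (str1 : String) (str2 : String) : Int :=
  let s1 := str1.toList
  let s2 := str2.toList
  let bigStr := if s1.length ≥ s2.length then s1 else s2
  let smlStr := if s1.length ≥ s2.length then s2 else s1
  let bigLen : Int := PySem.List.len bigStr + 1
  let smlLen : Int := PySem.List.len smlStr + 1
  let lst0 : List (List Int) :=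
    (PySem.List.pyRange 0 smlLen 1).map
      (fun _ => (PySem.List.pyRange 0 bigLen 1).map (fun _ => (0 : Int)))
  let st := (PySem.List.pyRange 1 smlLen 1).foldl (pvOuterA smlStr bigStr bigLen) (lst0, 0)
  let _tmp := pvBacktrackA (smlLen.toNat + bigLen.toNat) st.1 (smlLen - 1) (bigLen - 1) none bigStr []
  st.2

-- ===== PORT B =====
-- B's inner loop: next DP row from the previous one, carrying cur[-1] in `last`
def pvNextRowB (x : Char) (last : Int) (prev : List Int) (ys : List Char) : List Int :=
  match ys, prev with
  | [], _ => []
  | _ :: _, [] => []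
  | y :: ys', p0 :: prev' =>
    let c := if x = y then p0 + 1 else max (prev'.headD 0) last
    c :: pvNextRowB x c prev' ys'

def LongestCommonSubsequenceVowels_alt (str1 : String) (str2 : String) : Int :=
  let vowels : List Char := ['a', 'e', 'i', 'o', 'u']
  let xs := str1.toList.filter (fun c => vowels.contains c)
  let ys := str2.toList.filter (fun c => vowels.contains c)
  let final := xs.foldl (fun prev x => 0 :: pvNextRowB x 0 prev ys)
    (List.replicate (ys.length + 1) (0 : Int))
  PySem.List.pyGetD final (-1) 0

-- ===== PRECONDITION & SPEC =====
-- Pre_ excludes exactly the inputs on which A raises UnboundLocalError: both strings nonempty but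
-- sharing no vowel (the DP corner is 0, so `num` is never assigned in A's backtracking loop).
def Pre_LongestCommonSubsequenceVowels (str1 : String) (str2 : String) : Prop :=
  (str1.toList.isEmpty || str2.toList.isEmpty ||
    (['a', 'e', 'i', 'o', 'u'] : List Char).any
      (fun c => str1.toList.contains c && str2.toList.contains c)) = true
instance (str1 : String) (str2 : String) : Decidable (Pre_LongestCommonSubsequenceVowels str1 str2) := by
  unfold Pre_LongestCommonSubsequenceVowels; infer_instance

def pvWitness_LongestCommonSubsequenceVowels : String × String := ("banana", "ananas")

-- On inputs where both strings are nonempty but share no vowel, A raises UnboundLocalError;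
-- B returns 0, the correct vowel-LCS length, there.
def Raises_LongestCommonSubsequenceVowels (str1 : String) (str2 : String) : Prop :=
  (!str1.toList.isEmpty && !str2.toList.isEmpty &&
    !(['a', 'e', 'i', 'o', 'u'] : List Char).any
      (fun c => str1.toList.contains c && str2.toList.contains c)) = true
instance (str1 : String) (str2 : String) : Decidable (Raises_LongestCommonSubsequenceVowels str1 str2) := by
  unfold Raises_LongestCommonSubsequenceVowels; infer_instance

def pvRaiseWitness_LongestCommonSubsequenceVowels : String × String := ("b", "e")
def pvRaiseWitnessOut_LongestCommonSubsequenceVowels : Int := 0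

def Spec_LongestCommonSubsequenceVowels (str1 : String) (str2 : String) (out : Int) : Prop :=
  out = LongestCommonSubsequenceVowels_alt str1 str2
instance (str1 : String) (str2 : String) (out : Int) :
    Decidable (Spec_LongestCommonSubsequenceVowels str1 str2 out) := by
  unfold Spec_LongestCommonSubsequenceVowels; infer_instance

-- ===== CLAIM (what is proved, stated in full; the proofs are below) =====
def Claim_equal_LongestCommonSubsequenceVowels : Prop :=
  ∀ (str1 : String) (str2 : String), Dom_LongestCommonSubsequenceVowels str1 str2 →
    Pre_LongestCommonSubsequenceVowels str1 str2 →
    Spec_LongestCommonSubsequenceVowels str1 str2 (LongestCommonSubsequenceVowels str1 str2)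

def Claim_raises_LongestCommonSubsequenceVowels : Prop :=
  (∀ (str1 : String) (str2 : String), Dom_LongestCommonSubsequenceVowels str1 str2 →
      Raises_LongestCommonSubsequenceVowels str1 str2 →
      ¬ Pre_LongestCommonSubsequenceVowels str1 str2) ∧
  (Dom_LongestCommonSubsequenceVowels (pvRaiseWitness_LongestCommonSubsequenceVowels.1)
      (pvRaiseWitness_LongestCommonSubsequenceVowels.2) ∧
    Raises_LongestCommonSubsequenceVowels (pvRaiseWitness_LongestCommonSubsequenceVowels.1)
      (pvRaiseWitness_LongestCommonSubsequenceVowels.2) ∧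
    LongestCommonSubsequenceVowels_alt (pvRaiseWitness_LongestCommonSubsequenceVowels.1)
      (pvRaiseWitness_LongestCommonSubsequenceVowels.2) =
      pvRaiseWitnessOut_LongestCommonSubsequenceVowels)

-- ===== LEMMAS AND PROOFS =====

def pvIsVow (c : Char) : Bool := (['a', 'e', 'i', 'o', 'u'] : List Char).contains c

-- the LCS-style DP value with match predicate g (pvGV for A's vowel-LCS, pvGL for plain LCS)
def pvDP (g : Char → Char → Bool) : List Char → List Char → Int
  | [], _ => 0
  | _ :: _, [] => 0
  | a :: s, b :: t =>
    if g a b then 1 + pvDP g s t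
    else max (pvDP g (a :: s) t) (pvDP g s (b :: t))
termination_by s t => s.length + t.length

def pvGV (a b : Char) : Bool := a == b && pvIsVow a
def pvGL (a b : Char) : Bool := a == b

lemma pvDP_nil_left (g : Char → Char → Bool) (t : List Char) : pvDP g [] t = 0 := by
  simp [pvDP]

lemma pvDP_nil_right (g : Char → Char → Bool) (s : List Char) : pvDP g s [] = 0 := by
  cases s <;> simp [pvDP]

lemma pvDP_cons_cons (g : Char → Char → Bool) (a b : Char) (s t : List Char) :
    pvDP g (a :: s) (b :: t) =
      if g a b then 1 + pvDP g s t else max (pvDP g (a :: s) t) (pvDP g s (b :: t)) := by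
  simp [pvDP]

lemma pvDP_nonneg (g : Char → Char → Bool) (s t : List Char) : 0 ≤ pvDP g s t := by
  fun_induction pvDP g s t with
  | case1 => exact le_refl 0
  | case2 => exact le_refl 0
  | case3 a s b t h ih => omega
  | case4 a s b t h ih1 ih2 => exact le_trans ih1 (le_max_left _ _)

lemma pvDP_mono_bundle (g : Char → Char → Bool) :
    ∀ (n : Nat) (s t : List Char), s.length + t.length ≤ n →
      (∀ a, pvDP g s t ≤ pvDP g (a :: s) t ∧ pvDP g (a :: s) t ≤ 1 + pvDP g s t) ∧
      (∀ b, pvDP g s t ≤ pvDP g s (b :: t) ∧ pvDP g s (b :: t) ≤ 1 + pvDP g s t) := by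
  intro n
  induction n with
  | zero =>
    intro s t hst
    have hs : s = [] := by cases s with | nil => rfl | cons _ _ => simp at hst
    have ht : t = [] := by cases t with | nil => rfl | cons _ _ => simp at hst
    subst hs; subst ht
    constructor
    · intro a; simp [pvDP_nil_right]
    · intro b; simp [pvDP_nil_left]
  | succ n ih =>
    intro s t hst
    cases s with
    | nil =>
      have hL : pvDP g [] t = 0 := pvDP_nil_left g t
      refine ⟨fun a => ⟨by rw [hL]; exact pvDP_nonneg g _ _, ?_⟩,
              fun b => ⟨by rw [hL, pvDP_nil_left], by rw [hL, pvDP_nil_left]; omega⟩⟩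
      rw [hL]
      cases t with
      | nil => rw [pvDP_nil_right]; omega
      | cons b t' =>
        rw [pvDP_cons_cons]
        have h1 := ((ih [] t' (by simp only [List.length_cons, List.length_nil] at hst ⊢; omega)).1 a).2
        rw [pvDP_nil_left] at h1
        split_ifs with h
        · rw [pvDP_nil_left]
        · rw [pvDP_nil_left]
          exact max_le h1 (by omega)
    | cons c s' =>
      cases t with
      | nil =>
        refine ⟨fun a => ⟨by rw [pvDP_nil_right, pvDP_nil_right],
                           by rw [pvDP_nil_right, pvDP_nil_right]; omega⟩,
                fun b => ⟨by rw [pvDP_nil_right]; exact pvDP_nonneg g _ _, ?_⟩⟩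
        rw [pvDP_nil_right, pvDP_cons_cons]
        have h1 := ((ih s' [] (by simp only [List.length_cons, List.length_nil] at hst ⊢; omega)).2 b).2
        rw [pvDP_nil_right] at h1
        split_ifs with h
        · rw [pvDP_nil_right]
        · exact max_le (by rw [pvDP_nil_right]; omega) h1
      | cons b' t' =>
        have H2 := ih (c :: s') t' (by simp only [List.length_cons] at hst ⊢; omega)
        have H3 := ih s' (b' :: t') (by simp only [List.length_cons] at hst ⊢; omega)
        constructor
        · intro a
          constructor
          · rw [pvDP_cons_cons g a b' (c :: s') t']
            split_ifs with h
            · exact (H2.2 b').2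
            · exact le_max_right _ _
          · rw [pvDP_cons_cons g a b' (c :: s') t']
            split_ifs with h
            · have := (H2.2 b').1; omega
            · apply max_le
              · have h1 := (H2.1 a).2
                have h2 := (H2.2 b').1
                omega
              · omega
        · intro b
          constructor
          · rw [pvDP_cons_cons g c b s' (b' :: t')]
            split_ifs with h
            · exact (H3.1 c).2
            · exact le_max_left _ _
          · rw [pvDP_cons_cons g c b s' (b' :: t')]
            split_ifs with h
            · have := (H3.1 c).1; omega
            · apply max_le
              · omega
              · have h1 := (H3.2 b).2
                have h2 := (H3.1 c).1
                omega

lemma pvDP_le_cons_left (g : Char → Char → Bool) (a : Char) (s t : List Char) :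
    pvDP g s t ≤ pvDP g (a :: s) t :=
  ((pvDP_mono_bundle g (s.length + t.length) s t le_rfl).1 a).1

lemma pvDP_le_cons_right (g : Char → Char → Bool) (b : Char) (s t : List Char) :
    pvDP g s t ≤ pvDP g s (b :: t) :=
  ((pvDP_mono_bundle g (s.length + t.length) s t le_rfl).2 b).1

lemma pvDP_comm (g : Char → Char → Bool) (hsym : ∀ a b, g a b = g b a) :
    ∀ (n : Nat) (s t : List Char), s.length + t.length ≤ n → pvDP g s t = pvDP g t s := by
  intro n
  induction n with
  | zero =>
    intro s t hst
    cases s with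
    | nil => cases t with
      | nil => rfl
      | cons _ _ => simp at hst
    | cons _ _ => simp at hst
  | succ n ih =>
    intro s t hst
    cases s with
    | nil => cases t with
      | nil => rfl
      | cons b t' => rw [pvDP_nil_left, pvDP_nil_right]
    | cons c s' =>
      cases t with
      | nil => rw [pvDP_nil_left, pvDP_nil_right]
      | cons b t' =>
        rw [pvDP_cons_cons, pvDP_cons_cons, hsym b c]
        have e1 := ih s' t' (by simp only [List.length_cons] at hst ⊢; omega)
        have e2 := ih (c :: s') t' (by simp only [List.length_cons] at hst ⊢; omega)
        have e3 := ih s' (b :: t') (by simp only [List.length_cons] at hst ⊢; omega)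
        split_ifs with h
        · rw [e1]
        · rw [e2, e3, max_comm]

lemma pvDP_drop_left (g : Char → Char → Bool) (a : Char) (ha : ∀ b, g a b = false) :
    ∀ (t s : List Char), pvDP g (a :: s) t = pvDP g s t := by
  intro t
  induction t with
  | nil => intro s; rw [pvDP_nil_right, pvDP_nil_right]
  | cons b t' iht =>
    intro s
    rw [pvDP_cons_cons, ha b]
    simp only [Bool.false_eq_true, if_false]
    rw [iht s]
    exact max_eq_right (pvDP_le_cons_right g b s t')

lemma pvDP_drop_right (g : Char → Char → Bool) (b : Char) (hb : ∀ x, g x b = false) :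
    ∀ (s t : List Char), pvDP g s (b :: t) = pvDP g s t := by
  intro s
  induction s with
  | nil => intro t; rw [pvDP_nil_left, pvDP_nil_left]
  | cons c s' ihs =>
    intro t
    rw [pvDP_cons_cons, hb c]
    simp only [Bool.false_eq_true, if_false]
    rw [ihs t]
    exact max_eq_left (pvDP_le_cons_left g c s' t)

lemma pvGV_symm (a b : Char) : pvGV a b = pvGV b a := by
  by_cases h : a = b
  · subst h; rfl
  · have h' : ¬b = a := fun e => h e.symm
    unfold pvGV
    rw [show (a == b) = false from by simp [h], show (b == a) = false from by simp [h']]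
    simp

lemma pvV_eq_filter :
    ∀ (n : Nat) (s t : List Char), s.length + t.length ≤ n →
      pvDP pvGV s t = pvDP pvGL (s.filter pvIsVow) (t.filter pvIsVow) := by
  intro n
  induction n with
  | zero =>
    intro s t hst
    cases s with
    | nil => simp [pvDP_nil_left]
    | cons _ _ => simp at hst
  | succ n ih =>
    intro s t hst
    cases s with
    | nil => simp [pvDP_nil_left]
    | cons a s' =>
      cases t with
      | nil => simp [pvDP_nil_right]
      | cons b t' =>
        by_cases hva : pvIsVow a = true
        · by_cases hvb : pvIsVow b = true
          · rw [List.filter_cons_of_pos hva, List.filter_cons_of_pos hvb]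
            rw [pvDP_cons_cons pvGV a b s' t',
                pvDP_cons_cons pvGL a b (s'.filter pvIsVow) (t'.filter pvIsVow)]
            by_cases hab : a = b
            · subst hab
              rw [if_pos (by simp [pvGV, hva]), if_pos (by simp [pvGL])]
              rw [ih s' t' (by simp only [List.length_cons] at hst ⊢; omega)]
            · rw [if_neg (by simp [pvGV, hab]), if_neg (by simp [pvGL, hab])]
              have iha := ih (a :: s') t' (by simp only [List.length_cons] at hst ⊢; omega)
              have ihb := ih s' (b :: t') (by simp only [List.length_cons] at hst ⊢; omega)
              rw [List.filter_cons_of_pos hva] at iha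
              rw [List.filter_cons_of_pos hvb] at ihb
              rw [iha, ihb]
          · have hvb' : pvIsVow b = false := by
              cases hx : pvIsVow b
              · rfl
              · exact absurd hx hvb
            have hbV : ∀ x, pvGV x b = false := fun x => by
              by_cases hxb : x = b
              · subst hxb; simp [pvGV, hvb']
              · simp [pvGV, hxb]
            have hfb : (b :: t').filter pvIsVow = t'.filter pvIsVow :=
              List.filter_cons_of_neg (by simp [hvb'])
            rw [pvDP_drop_right pvGV b hbV, hfb]
            exact ih (a :: s') t' (by simp only [List.length_cons] at hst ⊢; omega)
        · have hva' : pvIsVow a = false := by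
            cases hx : pvIsVow a
            · rfl
            · exact absurd hx hva
          have ha : ∀ y, pvGV a y = false := fun y => by simp [pvGV, hva']
          have hfa : (a :: s').filter pvIsVow = s'.filter pvIsVow :=
            List.filter_cons_of_neg (by simp [hva'])
          rw [pvDP_drop_left pvGV a ha, hfa]
          exact ih s' (b :: t') (by simp only [List.length_cons] at hst ⊢; omega)

-- ===== A-side: the DP table =====

def pvCell (s t : List Char) (i j : Nat) : Int :=
  pvDP pvGV ((s.take i).reverse) ((t.take j).reverse)

lemma pvCell_zero_left (s t : List Char) (j : Nat) : pvCell s t 0 j = 0 := by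
  simp [pvCell, pvDP_nil_left]

lemma pvCell_zero_right (s t : List Char) (i : Nat) : pvCell s t i 0 = 0 := by
  simp [pvCell, pvDP_nil_right]

lemma pvCell_nonneg (s t : List Char) (i j : Nat) : 0 ≤ pvCell s t i j :=
  pvDP_nonneg _ _ _

lemma take_succ_reverse (s : List Char) (i : Nat) (hi : i < s.length) :
    (s.take (i + 1)).reverse = s[i] :: (s.take i).reverse := by
  rw [List.take_add_one, List.getElem?_eq_getElem hi]
  simp

lemma pvCell_succ_succ (s t : List Char) (i j : Nat) (hi : i < s.length) (hj : j < t.length) :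
    pvCell s t (i + 1) (j + 1) =
      if pvGV s[i] t[j] then 1 + pvCell s t i j
      else max (pvCell s t (i + 1) j) (pvCell s t i (j + 1)) := by
  unfold pvCell
  rw [take_succ_reverse s i hi, take_succ_reverse t j hj, pvDP_cons_cons]

lemma pvCell_mono_left (s t : List Char) (i j : Nat) (hi : i < s.length) :
    pvCell s t i j ≤ pvCell s t (i + 1) j := by
  unfold pvCell
  rw [take_succ_reverse s i hi]
  exact pvDP_le_cons_left _ _ _ _

lemma pvCell_mono_right (s t : List Char) (i j : Nat) (hj : j < t.length) :
    pvCell s t i j ≤ pvCell s t i (j + 1) := by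
  unfold pvCell
  rw [take_succ_reverse t j hj]
  exact pvDP_le_cons_right _ _ _ _

-- table states: pvRowA i j = row i with columns ≤ j filled; pvTblA i j = rows < i final,
-- row i filled through column j, rows > i still zero
def pvRowA (s t : List Char) (i j : Nat) : List Int :=
  (List.range (t.length + 1)).map (fun j' => if j' ≤ j then pvCell s t i j' else 0)

def pvTblA (s t : List Char) (i j : Nat) : List (List Int) :=
  (List.range (s.length + 1)).map
    (fun i' => if i' < i then pvRowA s t i' t.length
      else if i' = i then pvRowA s t i j
      else List.replicate (t.length + 1) 0)

lemma pvRowA_col_zero (s t : List Char) (i : Nat) :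
    pvRowA s t i 0 = List.replicate (t.length + 1) 0 := by
  unfold pvRowA
  rw [List.map_congr_left (g := fun _ => (0 : Int)) (fun j' _ => by
    split_ifs with h
    · have hj : j' = 0 := by omega
      subst hj; exact pvCell_zero_right s t i
    · rfl)]
  rw [List.map_const', List.length_range]

lemma pvRowA_row_zero (s t : List Char) (j : Nat) :
    pvRowA s t 0 j = List.replicate (t.length + 1) 0 := by
  unfold pvRowA
  rw [List.map_congr_left (g := fun _ => (0 : Int)) (fun j' _ => by
    split_ifs with h
    · exact pvCell_zero_left s t j'
    · rfl)]
  rw [List.map_const', List.length_range]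

lemma set_map_range {α : Type} (N idx : Nat) (f : Nat → α) (v : α) :
    ((List.range N).map f).set idx v =
      (List.range N).map (fun j => if j = idx then v else f j) := by
  apply List.ext_getElem
  · simp
  · intro k h1 h2
    simp only [List.getElem_set, List.getElem_map, List.getElem_range]
    rcases eq_or_ne idx k with h | h
    · subst h; simp
    · rw [if_neg h, if_neg (Ne.symm h)]

lemma pvInnerA_step (s t : List Char) (i j : Nat) (M : Int) (hi : i < s.length)
    (hj : j < t.length) :
    pvInnerA s t ((1 : Int) + (i : Int)) (pvTblA s t (i + 1) j, M) ((1 : Int) + (j : Int)) =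
      (pvTblA s t (i + 1) (j + 1),
        if pvCell s t (i + 1) (j + 1) > M then pvCell s t (i + 1) (j + 1) else M) := by
  have e1 : (1 : Int) + (i : Int) - 1 = ((i : Nat) : Int) := by ring
  have e2 : (1 : Int) + (j : Int) - 1 = ((j : Nat) : Int) := by ring
  have e3 : (1 : Int) + (i : Int) = ((i + 1 : Nat) : Int) := by push_cast; ring
  have e4 : (1 : Int) + (j : Int) = ((j + 1 : Nat) : Int) := by push_cast; ring
  have hrow_prev : PySem.List.pyGetD (pvTblA s t (i + 1) j) ((i : Nat) : Int) [] =
      pvRowA s t i t.length := by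
    rw [PySem.List.pyGetD_natCast, pvTblA, PySem.List.getD_map_range _ _ _ _ (by omega),
      if_pos (by omega)]
  have hrow_cur : PySem.List.pyGetD (pvTblA s t (i + 1) j) (((i + 1 : Nat)) : Int) [] =
      pvRowA s t (i + 1) j := by
    rw [PySem.List.pyGetD_natCast, pvTblA, PySem.List.getD_map_range _ _ _ _ (by omega),
      if_neg (by omega), if_pos rfl]
  have hc1 : PySem.List.pyGetD (pvRowA s t i t.length) ((j : Nat) : Int) 0 = pvCell s t i j := by
    rw [PySem.List.pyGetD_natCast, pvRowA, PySem.List.getD_map_range _ _ _ _ (by omega),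
      if_pos (by omega)]
  have hc2 : PySem.List.pyGetD (pvRowA s t i t.length) (((j + 1 : Nat)) : Int) 0 =
      pvCell s t i (j + 1) := by
    rw [PySem.List.pyGetD_natCast, pvRowA, PySem.List.getD_map_range _ _ _ _ (by omega),
      if_pos (by omega)]
  have hc3 : PySem.List.pyGetD (pvRowA s t (i + 1) j) ((j : Nat) : Int) 0 =
      pvCell s t (i + 1) j := by
    rw [PySem.List.pyGetD_natCast, pvRowA, PySem.List.getD_map_range _ _ _ _ (by omega),
      if_pos (by omega)]
  have hsi : PySem.List.pyGetD s ((i : Nat) : Int) ' ' = s[i] := by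
    rw [PySem.List.pyGetD_natCast, List.getD_eq_getElem s ' ' hi]
  have hbj : PySem.List.pyGetD t ((j : Nat) : Int) ' ' = t[j] := by
    rw [PySem.List.pyGetD_natCast, List.getD_eq_getElem t ' ' hj]
  have hcell : (if pvGV s[i] t[j] then 1 + pvCell s t i j
      else max (pvCell s t i (j + 1)) (pvCell s t (i + 1) j)) = pvCell s t (i + 1) (j + 1) := by
    rw [pvCell_succ_succ s t i j hi hj, max_comm (pvCell s t (i + 1) j) (pvCell s t i (j + 1))]
  have hset1 : PySem.List.pySetD (pvRowA s t (i + 1) j) (((j + 1 : Nat)) : Int)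
      (pvCell s t (i + 1) (j + 1)) = pvRowA s t (i + 1) (j + 1) := by
    rw [PySem.List.pySetD_natCast, pvRowA, set_map_range]
    apply List.map_congr_left
    intro j' hj'
    rcases eq_or_ne j' (j + 1) with h | h
    · subst h; rw [if_pos rfl, if_pos (by omega)]
    · rw [if_neg h]
      by_cases h2 : j' ≤ j
      · rw [if_pos h2, if_pos (by omega)]
      · rw [if_neg h2, if_neg (by omega)]
  have hset2 : PySem.List.pySetD (pvTblA s t (i + 1) j) (((i + 1 : Nat)) : Int)
      (pvRowA s t (i + 1) (j + 1)) = pvTblA s t (i + 1) (j + 1) := by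
    rw [PySem.List.pySetD_natCast, pvTblA, set_map_range]
    apply List.map_congr_left
    intro i' hi'
    rcases eq_or_ne i' (i + 1) with h | h
    · subst h; rw [if_pos rfl, if_neg (by omega), if_pos rfl]
    · rw [if_neg h]
      by_cases hlt : i' < i + 1
      · rw [if_pos hlt, if_pos hlt]
      · rw [if_neg hlt, if_neg hlt, if_neg h, if_neg h]
  simp only [pvInnerA]
  rw [e1, e2, hsi, hbj, hrow_prev]
  rw [e4, hc2]
  rw [e3, hrow_cur, hc3]
  rw [hc1]
  show (_, _) = (_, _)
  rw [show (s[i] == t[j] && (['a', 'e', 'i', 'o', 'u'] : List Char).contains s[i]) =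
      pvGV s[i] t[j] from rfl]
  rw [hcell, hset1, hset2]

lemma pvInner_invariant (s t : List Char) (i : Nat) (hi : i < s.length) :
    ∀ (j : Nat), j ≤ t.length → ∀ (M : Int), 0 ≤ M →
      ((List.range j).map (fun (k : Nat) => (1 : Int) + (k : Int))).foldl
          (pvInnerA s t ((1 : Int) + (i : Int))) (pvTblA s t (i + 1) 0, M) =
        (pvTblA s t (i + 1) j, max M (pvCell s t (i + 1) j)) := by
  intro j
  induction j with
  | zero =>
    intro _ M hM
    simp only [List.range_zero, List.map_nil, List.foldl_nil]
    rw [pvCell_zero_right, max_eq_left hM]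
  | succ j ihj =>
    intro h M hM
    rw [List.range_succ, List.map_append, List.foldl_append, ihj (by omega) M hM]
    simp only [List.map_cons, List.map_nil, List.foldl_cons, List.foldl_nil]
    rw [pvInnerA_step s t i j (max M (pvCell s t (i + 1) j)) hi (by omega)]
    have hmono := pvCell_mono_right s t (i + 1) j (by omega)
    congr 1
    by_cases hcmp : pvCell s t (i + 1) (j + 1) > max M (pvCell s t (i + 1) j)
    · rw [if_pos hcmp]
      exact (max_eq_right (le_trans (le_max_left _ _) (le_of_lt hcmp))).symm
    · rw [if_neg hcmp]
      rw [not_lt] at hcmp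
      apply le_antisymm
      · exact max_le (le_max_left _ _) (le_trans hmono (le_max_right _ _))
      · exact max_le (le_max_left _ _) hcmp

lemma pvTblA_zero_step (s t : List Char) (i : Nat) :
    pvTblA s t i t.length = pvTblA s t (i + 1) 0 := by
  unfold pvTblA
  apply List.map_congr_left
  intro i' _
  by_cases hlt : i' < i
  · rw [if_pos hlt, if_pos (by omega)]
  · by_cases heq : i' = i
    · subst heq
      rw [if_neg hlt, if_pos rfl, if_pos (by omega)]
    · by_cases heq2 : i' = i + 1
      · subst heq2
        rw [if_neg hlt, if_neg heq, if_neg (by omega), if_pos rfl, pvRowA_col_zero]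
      · rw [if_neg hlt, if_neg heq, if_neg (by omega), if_neg heq2]

lemma pvOuter_invariant (s t : List Char) :
    ∀ (i : Nat), i ≤ s.length →
      ((List.range i).map (fun (k : Nat) => (1 : Int) + (k : Int))).foldl
          (pvOuterA s t ((t.length : Int) + 1)) (pvTblA s t 0 t.length, 0) =
        (pvTblA s t i t.length, pvCell s t i t.length) := by
  intro i
  induction i with
  | zero =>
    intro _
    simp only [List.range_zero, List.map_nil, List.foldl_nil]
    rw [pvCell_zero_left]
  | succ i ihi =>
    intro h
    rw [List.range_succ, List.map_append, List.foldl_append, ihi (by omega)]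
    simp only [List.map_cons, List.map_nil, List.foldl_cons, List.foldl_nil]
    unfold pvOuterA
    rw [PySem.List.pyRange_one]
    rw [show ((t.length : Int) + 1 - 1).toNat = t.length from by omega]
    rw [pvTblA_zero_step]
    rw [pvInner_invariant s t i (by omega) t.length le_rfl (pvCell s t i t.length)
      (pvCell_nonneg s t i t.length)]
    rw [max_eq_right (pvCell_mono_left s t i t.length (by omega))]

lemma pvTblA_init (s t : List Char) :
    pvTblA s t 0 t.length = List.replicate (s.length + 1) (List.replicate (t.length + 1) (0 : Int)) := by
  unfold pvTblA
  rw [List.map_congr_left (g := fun _ => List.replicate (t.length + 1) (0 : Int)) (fun i' _ => by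
    rw [if_neg (by omega)]
    by_cases h : i' = 0
    · subst h; rw [if_pos rfl]; exact pvRowA_row_zero s t t.length
    · rw [if_neg h])]
  rw [List.map_const', List.length_range]

lemma portA_eq_cell (s t : List Char) :
    ((PySem.List.pyRange 1 (PySem.List.len s + 1) 1).foldl
        (pvOuterA s t (PySem.List.len t + 1))
        ((PySem.List.pyRange 0 (PySem.List.len s + 1) 1).map
          (fun _ => (PySem.List.pyRange 0 (PySem.List.len t + 1) 1).map (fun _ => (0 : Int))), 0)).2 =
      pvDP pvGV s.reverse t.reverse := by
  rw [PySem.List.len_eq, PySem.List.len_eq]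
  have hinit : ((PySem.List.pyRange 0 ((s.length : Int) + 1) 1).map
      (fun _ => (PySem.List.pyRange 0 ((t.length : Int) + 1) 1).map (fun _ => (0 : Int)))) =
      pvTblA s t 0 t.length := by
    rw [List.map_const', List.map_const', PySem.List.length_pyRange_one,
      PySem.List.length_pyRange_one,
      show (((s.length : Int) + 1 - 0).toNat) = s.length + 1 from by omega,
      show (((t.length : Int) + 1 - 0).toNat) = t.length + 1 from by omega]
    exact (pvTblA_init s t).symm
  rw [hinit, PySem.List.pyRange_one,
    show (((s.length : Int) + 1 - 1).toNat) = s.length from by omega]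
  rw [pvOuter_invariant s t s.length le_rfl]
  show pvCell s t s.length t.length = _
  unfold pvCell
  rw [List.take_length, List.take_length]

-- ===== B-side: the rolling row =====

def pvRowB (ys u : List Char) : List Int :=
  (List.range (ys.length + 1)).map (fun j => pvDP pvGL u.reverse ((ys.take j).reverse))

lemma pvNextRowB_spec (ys : List Char) (x : Char) (u : List Char) :
    ∀ (rest done : List Char), ys = done ++ rest →
      pvNextRowB x (pvDP pvGL (x :: u.reverse) ((ys.take done.length).reverse))
          ((List.range (rest.length + 1)).map
            (fun d => pvDP pvGL u.reverse ((ys.take (done.length + d)).reverse))) rest =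
        (List.range rest.length).map
          (fun d => pvDP pvGL (x :: u.reverse) ((ys.take (done.length + d + 1)).reverse)) := by
  intro rest
  induction rest with
  | nil => intro done h; simp [pvNextRowB]
  | cons y rest' ih =>
    intro done hys
    have htk : ys.take done.length = done := by rw [hys]; exact List.take_left
    have htk1 : ys.take (done.length + 1) = done ++ [y] := by
      rw [hys, List.take_append, List.take_of_length_le (by omega),
        show done.length + 1 - done.length = 1 from by omega]
      rfl
    simp only [List.length_cons]
    rw [List.range_succ_eq_map, List.map_cons, List.map_map]
    simp only [Nat.add_zero]
    simp only [pvNextRowB]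
    have hhead : ((List.range (rest'.length + 1)).map
        ((fun d => pvDP pvGL u.reverse ((ys.take (done.length + d)).reverse)) ∘ Nat.succ)).headD 0 =
        pvDP pvGL u.reverse ((ys.take (done.length + 1)).reverse) := by
      rw [List.range_succ_eq_map]
      simp [Function.comp]
    rw [hhead, htk]
    have hc : (if x = y then pvDP pvGL u.reverse done.reverse + 1
        else max (pvDP pvGL u.reverse ((ys.take (done.length + 1)).reverse))
          (pvDP pvGL (x :: u.reverse) done.reverse)) =
        pvDP pvGL (x :: u.reverse) ((ys.take (done.length + 1)).reverse) := by
      rw [htk1]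
      simp only [List.reverse_append, List.reverse_cons, List.reverse_nil, List.nil_append,
        List.singleton_append]
      rw [pvDP_cons_cons]
      by_cases hxy : x = y
      · rw [if_pos hxy, if_pos (by simp [pvGL, hxy])]
        omega
      · rw [if_neg hxy, if_neg (by simp [pvGL, hxy]), max_comm]
    rw [hc]
    have hprev : ((List.range (rest'.length + 1)).map
        ((fun d => pvDP pvGL u.reverse ((ys.take (done.length + d)).reverse)) ∘ Nat.succ)) =
        ((List.range (rest'.length + 1)).map
          (fun d => pvDP pvGL u.reverse ((ys.take ((done ++ [y]).length + d)).reverse))) := by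
      apply List.map_congr_left
      intro d _
      show pvDP pvGL u.reverse ((ys.take (done.length + Nat.succ d)).reverse) = _
      rw [show done.length + Nat.succ d = (done ++ [y]).length + d from by simp; omega]
    rw [hprev,
      show pvDP pvGL (x :: u.reverse) ((ys.take (done.length + 1)).reverse) =
        pvDP pvGL (x :: u.reverse) ((ys.take (done ++ [y]).length).reverse) from by simp]
    rw [ih (done ++ [y]) (by rw [hys]; simp)]
    rw [List.range_succ_eq_map, List.map_cons, List.map_map]
    simp only [Nat.add_zero, List.length_append, List.length_cons, List.length_nil, Nat.zero_add]
    congr 1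
    apply List.map_congr_left
    intro d _
    show pvDP pvGL (x :: u.reverse) ((ys.take (done.length + 1 + d + 1)).reverse) =
      pvDP pvGL (x :: u.reverse) ((ys.take (done.length + Nat.succ d + 1)).reverse)
    rw [show done.length + 1 + d + 1 = done.length + Nat.succ d + 1 from by omega]

lemma pvRowB_step (ys u : List Char) (x : Char) :
    0 :: pvNextRowB x 0 (pvRowB ys u) ys = pvRowB ys (u ++ [x]) := by
  have hs := pvNextRowB_spec ys x u ys [] rfl
  simp only [List.length_nil, Nat.zero_add, List.take_zero, List.reverse_nil] at hs
  rw [pvDP_nil_right] at hs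
  rw [show pvRowB ys u =
      (List.range (ys.length + 1)).map (fun d => pvDP pvGL u.reverse ((ys.take d).reverse)) from rfl]
  rw [hs]
  unfold pvRowB
  rw [List.range_succ_eq_map, List.map_cons, List.map_map]
  congr 1
  · simp [pvDP_nil_right]
  · apply List.map_congr_left
    intro d _
    show pvDP pvGL (x :: u.reverse) ((ys.take (d + 1)).reverse) =
      pvDP pvGL ((u ++ [x]).reverse) ((ys.take (Nat.succ d)).reverse)
    simp [List.reverse_append]
  
lemma pvRowB_fold (ys : List Char) :
    ∀ (xs u : List Char),
      xs.foldl (fun prev x => 0 :: pvNextRowB x 0 prev ys) (pvRowB ys u) = pvRowB ys (u ++ xs) := by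
  intro xs
  induction xs with
  | nil => intro u; simp
  | cons x xs' ih =>
    intro u
    rw [List.foldl_cons, pvRowB_step ys u x, ih (u ++ [x])]
    simp

lemma pvRowB_nil (ys : List Char) : pvRowB ys [] = List.replicate (ys.length + 1) (0 : Int) := by
  unfold pvRowB
  rw [List.map_congr_left (g := fun _ => (0 : Int)) (fun j _ => by
    simp [pvDP_nil_left])]
  rw [List.map_const', List.length_range]

lemma portB_eq (str1 str2 : String) :
    LongestCommonSubsequenceVowels_alt str1 str2 =
      pvDP pvGL ((str1.toList.filter pvIsVow).reverse) ((str2.toList.filter pvIsVow).reverse) := by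
  show PySem.List.pyGetD ((str1.toList.filter pvIsVow).foldl
      (fun prev x => 0 :: pvNextRowB x 0 prev (str2.toList.filter pvIsVow))
      (List.replicate ((str2.toList.filter pvIsVow).length + 1) (0 : Int))) (-1) 0 = _
  rw [← pvRowB_nil (str2.toList.filter pvIsVow),
    pvRowB_fold (str2.toList.filter pvIsVow) (str1.toList.filter pvIsVow) [],
    List.nil_append]
  unfold pvRowB
  rw [List.range_succ, List.map_append, List.map_cons, List.map_nil,
    PySem.List.pyGetD_neg_one_append_singleton, List.take_length]

lemma pvH1 : Dom_LongestCommonSubsequenceVowels (pvRaiseWitness_LongestCommonSubsequenceVowels.1)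
    (pvRaiseWitness_LongestCommonSubsequenceVowels.2) := by decide

lemma pvH2 : Raises_LongestCommonSubsequenceVowels (pvRaiseWitness_LongestCommonSubsequenceVowels.1)
    (pvRaiseWitness_LongestCommonSubsequenceVowels.2) := by decide

lemma pvH3 : LongestCommonSubsequenceVowels_alt (pvRaiseWitness_LongestCommonSubsequenceVowels.1)
    (pvRaiseWitness_LongestCommonSubsequenceVowels.2) =
    pvRaiseWitnessOut_LongestCommonSubsequenceVowels := by rfl

-- ===== VERDICT (by name: the statement is the Claim_ definition above) =====
theorem LongestCommonSubsequenceVowels_spec : Claim_equal_LongestCommonSubsequenceVowels := by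
  intro str1 str2 _ _
  unfold Spec_LongestCommonSubsequenceVowels
  rw [portB_eq]
  by_cases hlen : str1.toList.length ≥ str2.toList.length
  · have hA : LongestCommonSubsequenceVowels str1 str2 =
        pvDP pvGV (str2.toList.reverse) (str1.toList.reverse) := by
      simp only [LongestCommonSubsequenceVowels]
      rw [if_pos hlen, if_pos hlen]
      exact portA_eq_cell str2.toList str1.toList
    rw [hA,
      pvDP_comm pvGV pvGV_symm (str2.toList.reverse.length + str1.toList.reverse.length) _ _ le_rfl,
      pvV_eq_filter (str1.toList.reverse.length + str2.toList.reverse.length) _ _ le_rfl,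
      List.filter_reverse, List.filter_reverse]
  · have hA : LongestCommonSubsequenceVowels str1 str2 =
        pvDP pvGV (str1.toList.reverse) (str2.toList.reverse) := by
      simp only [LongestCommonSubsequenceVowels]
      rw [if_neg hlen, if_neg hlen]
      exact portA_eq_cell str1.toList str2.toList
    rw [hA,
      pvV_eq_filter (str1.toList.reverse.length + str2.toList.reverse.length) _ _ le_rfl,
      List.filter_reverse, List.filter_reverse]

@[simp]
theorem LongestCommonSubsequenceVowels_raises : Claim_raises_LongestCommonSubsequenceVowels := by
  unfold Claim_raises_LongestCommonSubsequenceVowels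
  constructor
  · intro s1 s2 _ hr hpre
    unfold Raises_LongestCommonSubsequenceVowels at hr
    unfold Pre_LongestCommonSubsequenceVowels at hpre
    simp only [Bool.and_eq_true, Bool.not_eq_true'] at hr
    obtain ⟨⟨h1, h2⟩, h3⟩ := hr
    rw [h1, h2, h3] at hpre
    simp at hpre
  · refine ⟨pvH1, pvH2, pvH3⟩
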